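-- pv_equiv track=rewrite | github.com/lysikov-pv/py_edu2 | les_2/ex_12.py | gues_enum
-- ===== SOURCE A (Python) =====
-- def gues_enum(s, p):
--     result = None
--     i = 1
--     while i < s and result == None:
--         if p == i * (s-i):
--             result = [i, s-i]
--         i += 1
--     return result
-- ===== SOURCE B (Python) =====
-- def _isqrt(n):
--     # hand-rolled Newton integer square root (no imports in the original module)
--     if n <= 1:
--         return n
--     guess = 1 << ((n.bit_length() - 1) // 2 + 1)
--     while True:
--         nxt = (guess + n // guess) // 2
--         if nxt < guess:
--             guess = nxt
--         else:
--             return guess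
--
-- def gues_enum(s, p):
--     # closed form: i and s-i are the roots of x^2 - s*x + p = 0
--     d = s * s - 4 * p
--     if d < 0:
--         return None
--     t = _isqrt(d)
--     if t * t != d or (s - t) % 2 != 0:
--         return None
--     i = (s - t) // 2
--     if 1 <= i < s:
--         return [i, s - i]
--     return None
-- ===== Notes on version B (the rewrite author's own statement) =====
-- stated objective: faster
-- what changed: A scans i = 1..s-1 for i*(s-i) == p; B solves the quadratic x^2 - s*x + p = 0 in closed form via a Newton integer square root of the discriminant and verifies the smaller root.
import Mathlib
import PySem

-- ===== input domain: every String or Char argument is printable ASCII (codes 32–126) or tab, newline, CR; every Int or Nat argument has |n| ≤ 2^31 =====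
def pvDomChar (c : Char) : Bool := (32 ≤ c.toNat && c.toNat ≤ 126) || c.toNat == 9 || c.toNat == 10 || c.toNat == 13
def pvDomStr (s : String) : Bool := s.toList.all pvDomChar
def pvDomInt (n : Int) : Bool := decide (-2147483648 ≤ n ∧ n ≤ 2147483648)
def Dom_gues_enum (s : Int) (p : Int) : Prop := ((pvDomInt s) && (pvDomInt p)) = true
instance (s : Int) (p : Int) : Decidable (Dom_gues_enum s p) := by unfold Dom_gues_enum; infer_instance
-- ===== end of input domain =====

-- B replaces A's linear scan by a closed form: solve x^2 - s*x + p = 0 with a hand-rolled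
-- Newton integer square root and verify the smaller root (faster: O(log) vs O(s)).

-- ===== PORT A =====
-- the while loop: state (i, result); exits when i ≥ s or result ≠ none
def guesLoop (s p i : Int) (result : Option (List Int)) : Option (List Int) :=
  if i < s ∧ result = none then
    guesLoop s p (i + 1) (if p = i * (s - i) then some [i, s - i] else result)
  else result
termination_by (s - i).toNat
decreasing_by omega

def gues_enum (s : Int) (p : Int) : Option (List Int) :=
  guesLoop s p 1 none

-- ===== PORT B =====
-- Newton iteration of Source B's _isqrt: nxt = (guess + n // guess) // 2, loop while nxt < guess
def isqrtIter (n guess : Nat) : Nat :=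
  let nxt := (guess + n / guess) / 2
  if _h : nxt < guess then isqrtIter n nxt else guess
termination_by guess

-- Source B's _isqrt: initial guess 1 << ((n.bit_length() - 1) // 2 + 1) for n ≥ 2
def pyIsqrt (n : Int) : Int :=
  if n ≤ 1 then n
  else (isqrtIter n.toNat (1 <<< ((PySem.Int.bitLength n - 1) / 2 + 1)) : Int)

def gues_enum_alt (s : Int) (p : Int) : Option (List Int) :=
  let d := s * s - 4 * p
  if d < 0 then none
  else
    let t := pyIsqrt d
    if t * t ≠ d ∨ PySem.Int.mod (s - t) 2 ≠ 0 then none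
    else
      let i := PySem.Int.floordiv (s - t) 2
      if 1 ≤ i ∧ i < s then some [i, s - i] else none

-- ===== PRECONDITION & SPEC =====
def Spec_gues_enum (s : Int) (p : Int) (out : Option (List Int)) : Prop := out = gues_enum_alt s p
instance (s : Int) (p : Int) (out : Option (List Int)) : Decidable (Spec_gues_enum s p out) := by unfold Spec_gues_enum; infer_instance

-- ===== CLAIM (what is proved, stated in full; the proofs are below) =====
def Claim_equal_gues_enum : Prop := ∀ (s : Int) (p : Int), Dom_gues_enum s p → Spec_gues_enum s p (gues_enum s p)

-- ===== LEMMAS AND PROOFS =====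

-- Source B's Newton loop is literally Lean core's Nat.sqrt.iter
theorem isqrtIter_eq_core (n g : Nat) : isqrtIter n g = Nat.sqrt.iter n g := by
  induction g using Nat.strong_induction_on with
  | _ g ih =>
    unfold isqrtIter Nat.sqrt.iter
    dsimp only
    split
    · next h => rw [ih _ h]
    · rfl

-- Source B's initial guess equals Nat.sqrt's: bit_length - 1 = log2 for positive n
theorem bitLength_eq_log2 (m : Nat) (h : 0 < m) :
    PySem.Int.bitLength (m : Int) = Nat.log2 m + 1 := by
  have h1 := PySem.Int.lt_two_pow_bitLength (m : Int)
  have h2 := PySem.Int.two_pow_bitLength_le (m : Int) (Int.natCast_ne_zero.mpr (by omega))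
  rw [Int.natAbs_natCast] at h1 h2
  have h3 := Nat.log2_self_le (by omega : m ≠ 0)
  have h4 := Nat.lt_log2_self (n := m)
  set b := PySem.Int.bitLength (m : Int) with hb
  set l := Nat.log2 m with hl
  have hub : b - 1 < l + 1 := by
    rw [← Nat.pow_lt_pow_iff_right (a := 2) one_lt_two]; omega
  have hlb : l < b := by
    rw [← Nat.pow_lt_pow_iff_right (a := 2) one_lt_two]; omega
  omega

theorem pyIsqrt_eq_sqrt (d : Int) (hd : 0 ≤ d) : pyIsqrt d = (Nat.sqrt d.toNat : Int) := by
  unfold pyIsqrt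
  split
  · next h =>
    interval_cases d <;> simp [Nat.sqrt]
  · next h =>
    rw [isqrtIter_eq_core]
    have h2 : ¬ d.toNat ≤ 1 := by omega
    have h5 := bitLength_eq_log2 d.toNat (by omega)
    rw [show ((d.toNat : Nat) : Int) = d from by omega] at h5
    rw [Nat.sqrt]
    simp only [h2, if_false]
    rw [h5, Nat.add_sub_cancel]

theorem pyIsqrt_sq (u : Int) (hu : 0 ≤ u) : pyIsqrt (u * u) = u := by
  rw [pyIsqrt_eq_sqrt _ (mul_nonneg hu hu)]
  have h1 : (u * u).toNat = u.toNat * u.toNat := by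
    have hc : ((u * u).toNat : Int) = ((u.toNat * u.toNat : Nat) : Int) := by
      push_cast
      rw [Int.toNat_of_nonneg (mul_nonneg hu hu), Int.toNat_of_nonneg hu]
    exact_mod_cast hc
  rw [h1]
  have h2 := Nat.sqrt_eq' u.toNat
  rw [pow_two] at h2
  rw [h2]
  omega

-- B when i0 is the least root in [1, s)
theorem alt_found (s p i0 : Int) (h1 : 1 ≤ i0) (h2 : i0 < s) (hp : p = i0 * (s - i0))
    (hmin : ∀ j : Int, 1 ≤ j → j < i0 → p ≠ j * (s - j)) :
    gues_enum_alt s p = some [i0, s - i0] := by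
  -- i0 is the smaller root: otherwise s - i0 is a root below i0
  have hle : 2 * i0 ≤ s := by
    by_contra hlt
    exact hmin (s - i0) (by omega) (by omega) (by rw [hp]; ring)
  have hd' : s * s - 4 * p = (s - 2 * i0) * (s - 2 * i0) := by rw [hp]; ring
  have hdnn : ¬ (s * s - 4 * p < 0) := by nlinarith [sq_nonneg (s - 2 * i0)]
  simp only [gues_enum_alt]
  rw [if_neg hdnn, hd', pyIsqrt_sq _ (by omega)]
  have hmod : PySem.Int.mod (s - (s - 2 * i0)) 2 = 0 := by
    rw [PySem.Int.mod_eq_zero_iff_dvd]; omega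
  have hc : ¬ ((s - 2 * i0) * (s - 2 * i0) ≠ (s - 2 * i0) * (s - 2 * i0) ∨
      PySem.Int.mod (s - (s - 2 * i0)) 2 ≠ 0) := by
    push_neg; exact ⟨rfl, hmod⟩
  rw [if_neg hc]
  have hdiv : PySem.Int.floordiv (s - (s - 2 * i0)) 2 = i0 := by
    rw [PySem.Int.floordiv_eq_ediv_of_pos (by omega)]; omega
  rw [hdiv, if_pos ⟨h1, h2⟩]

-- B when there is no root in [1, s)
theorem alt_none (s p : Int) (hno : ∀ j : Int, 1 ≤ j → j < s → p ≠ j * (s - j)) :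
    gues_enum_alt s p = none := by
  simp only [gues_enum_alt]
  split_ifs with h1 h2 h3
  · rfl
  · rfl
  · exfalso
    push_neg at h2
    obtain ⟨hsq, hmod⟩ := h2
    obtain ⟨hi1, hi2⟩ := h3
    have ht0 : 0 ≤ pyIsqrt (s * s - 4 * p) := by
      rw [pyIsqrt_eq_sqrt _ (by omega)]; positivity
    set t := pyIsqrt (s * s - 4 * p) with hts
    rw [PySem.Int.mod_eq_zero_iff_dvd] at hmod
    rw [PySem.Int.floordiv_eq_ediv_of_pos (by omega : (0:Int) < 2)] at hi1 hi2
    set i := (s - t) / 2 with his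
    have h2i : s - t = 2 * i := by omega
    apply hno i (by omega) (by omega)
    nlinarith [hsq]
  · rfl

-- A's loop returns the least root ≥ i
theorem loop_found (s p : Int) (i0 : Int) (h2 : i0 < s) (hp : p = i0 * (s - i0))
    (i : Int) (hle : i ≤ i0) (hmin : ∀ j : Int, i ≤ j → j < i0 → p ≠ j * (s - j)) :
    guesLoop s p i none = some [i0, s - i0] := by
  have hwf : 0 ≤ s - i := by omega
  generalize hk : (s - i).toNat = k at *
  induction k using Nat.strong_induction_on generalizing i with
  | _ k ih =>
    rw [guesLoop]
    rw [if_pos ⟨by omega, rfl⟩]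
    by_cases heq : p = i * (s - i)
    · have hii : i = i0 := by
        by_contra hne
        exact hmin i le_rfl (by omega) heq
      subst hii
      rw [if_pos heq, guesLoop, if_neg (fun h => by simp at h)]
    · rw [if_neg heq]
      have hne : i ≠ i0 := fun h => heq (h ▸ hp)
      exact ih (s - (i + 1)).toNat (by omega) (i + 1) (by omega)
        (fun j hj1 hj2 => hmin j (by omega) hj2) (by omega) rfl

-- A's loop finds nothing when there is no root in [i, s)
theorem loop_none (s p : Int) (i : Int) (hno : ∀ j : Int, i ≤ j → j < s → p ≠ j * (s - j)) :
    guesLoop s p i none = none := by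
  by_cases hlt : i < s
  · have hwf : 0 ≤ s - i := by omega
    generalize hk : (s - i).toNat = k at *
    induction k using Nat.strong_induction_on generalizing i with
    | _ k ih =>
      rw [guesLoop, if_pos ⟨hlt, rfl⟩, if_neg (hno i le_rfl hlt)]
      by_cases hlt2 : i + 1 < s
      · exact ih (s - (i + 1)).toNat (by omega) (i + 1)
          (fun j hj1 hj2 => hno j (by omega) hj2) hlt2 (by omega) rfl
      · rw [guesLoop, if_neg (fun h => hlt2 h.1)]
  · rw [guesLoop, if_neg (fun h => hlt h.1)]

-- ===== VERDICT (by name: the statement is the Claim_ definition above) =====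
theorem gues_enum_spec : Claim_equal_gues_enum := by
  intro s p _
  unfold Spec_gues_enum gues_enum
  by_cases hex : ∃ j : Int, 1 ≤ j ∧ j < s ∧ p = j * (s - j)
  · -- take the least root via Nat.find on k = j - 1
    obtain ⟨j, hj1, hj2, hjp⟩ := hex
    have hP : ∃ k : Nat, 1 + (k : Int) < s ∧ p = (1 + (k : Int)) * (s - (1 + (k : Int))) := by
      refine ⟨(j - 1).toNat, ?_, ?_⟩ <;>
        rw [show (1 : Int) + ((j - 1).toNat : Int) = j from by omega]
      · exact hj2
      · exact hjp
    classical
    obtain ⟨hk0s, hk0p⟩ := Nat.find_spec hP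
    set k0 := Nat.find hP with hk0
    set i0 : Int := 1 + (k0 : Int) with hi0
    have hmin : ∀ j' : Int, 1 ≤ j' → j' < i0 → p ≠ j' * (s - j') := by
      intro j' h1 h2 hpe
      have hk' : (j' - 1).toNat < k0 := by omega
      apply Nat.find_min hP hk'
      rw [show (1 : Int) + (((j' - 1).toNat : Nat) : Int) = j' from by omega]
      exact ⟨by omega, hpe⟩
    rw [loop_found s p i0 (by omega) hk0p 1 (by omega) (fun j' hj1' hj2' => hmin j' hj1' hj2'),
      alt_found s p i0 (by omega) (by omega) hk0p hmin]
  · push_neg at hex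
    rw [loop_none s p 1 (fun j hj1 hj2 => hex j hj1 hj2),
      alt_none s p (fun j hj1 hj2 => hex j hj1 hj2)]
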